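-- pv_equiv track=rewrite | github.com/jmmoloney/secret-santa | requirements.py | short_circuit
-- ===== SOURCE A (Python) =====
-- def short_circuit(giver_list, receiver_list):
--     """Determine if there is a 'short circuit'.
--
--     i.e. checks if two people are to exchange gifts with eachother.
--
--     Parameters
--     ----------
--     giver_list : list[str]
--         Ordered list of giver's names.
--     receiver_list : list[str]
--         Ordered list of receiver's names (matches with giver_list).
--
--     Returns
--     -------
--     bool
--         True if giver/receiver pair exists as receiver/giver pair
--         False otherwise
--
--     """
--     # sorts tuples in alphabetical order
--     giver_receiver_pairs = [
--         sorted(pair) for pair in zip(giver_list, receiver_list)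
--     ]
--     short_circuit = False
--     while len(giver_receiver_pairs) != 0:
--         pair = giver_receiver_pairs.pop()
--         # checks if pair still exists in remaining pairs
--         if pair in giver_receiver_pairs:
--             short_circuit = True
--     return short_circuit
-- ===== SOURCE B (Python) =====
-- def short_circuit(giver_list, receiver_list):
--     seen = set()
--     for giver, receiver in zip(giver_list, receiver_list):
--         key = (min(giver, receiver), max(giver, receiver))
--         if key in seen:
--             return True
--         seen.add(key)
--     return False
-- ===== Notes on version B (the rewrite author's own statement) =====
-- stated objective: faster
-- what changed: Replaces the pop-from-end-and-rescan-remaining-list loop with a single forward pass that keeps the (min,max) normalised pairs already seen in a hash set and returns True on the first repeat.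
import Mathlib
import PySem

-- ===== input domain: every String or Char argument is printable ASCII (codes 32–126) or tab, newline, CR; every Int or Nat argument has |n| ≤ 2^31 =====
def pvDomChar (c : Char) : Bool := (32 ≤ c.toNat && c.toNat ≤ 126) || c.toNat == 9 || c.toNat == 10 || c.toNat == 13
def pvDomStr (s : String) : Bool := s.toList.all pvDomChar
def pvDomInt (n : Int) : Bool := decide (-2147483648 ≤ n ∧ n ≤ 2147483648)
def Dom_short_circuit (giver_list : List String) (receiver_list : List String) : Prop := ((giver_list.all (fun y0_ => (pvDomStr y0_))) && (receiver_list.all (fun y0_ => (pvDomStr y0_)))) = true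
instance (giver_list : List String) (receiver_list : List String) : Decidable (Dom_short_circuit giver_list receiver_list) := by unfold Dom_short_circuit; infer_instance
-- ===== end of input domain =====

-- B replaces A's pop-and-rescan loop by one forward pass over zip with a set of already-seen
-- normalised pairs and an early return (objective: faster).

-- ===== PORT A =====
-- the while loop: pop() takes the last element (getLast) leaving dropLast; flag is set if the
-- popped pair still occurs among the remaining pairs
def short_circuit_loopA (pairs : List (List String)) (flag : Bool) : Bool :=
  if h : pairs ≠ [] then
    short_circuit_loopA pairs.dropLast
      (if pairs.getLast h ∈ pairs.dropLast then true else flag)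
  else flag
termination_by pairs.length
decreasing_by
  have : pairs.length ≠ 0 := fun h0 => h (List.length_eq_zero_iff.mp h0)
  simp [List.length_dropLast]; omega

def short_circuit (giver_list : List String) (receiver_list : List String) : Bool :=
  let giver_receiver_pairs :=
    (giver_list.zip receiver_list).map
      (fun pair => PySem.List.sorted [pair.1, pair.2] (fun x => x) false)
  short_circuit_loopA giver_receiver_pairs false

-- ===== PORT B =====
def short_circuit_loopB (ks : List (String × String)) (seen : PySem.Set (String × String)) : Bool :=
  match ks with
  | [] => false
  | (giver, receiver) :: rest =>
    let key := (min giver receiver, max giver receiver)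
    if key ∈ seen then true else short_circuit_loopB rest (PySem.Set.add seen key)

def short_circuit_alt (giver_list : List String) (receiver_list : List String) : Bool :=
  short_circuit_loopB (giver_list.zip receiver_list) PySem.Set.empty

-- ===== PRECONDITION & SPEC =====
def Spec_short_circuit (giver_list : List String) (receiver_list : List String) (out : Bool) : Prop := out = short_circuit_alt giver_list receiver_list
instance (giver_list : List String) (receiver_list : List String) (out : Bool) : Decidable (Spec_short_circuit giver_list receiver_list out) := by unfold Spec_short_circuit; infer_instance

-- ===== CLAIM (what is proved, stated in full; the proofs are below) =====
def Claim_equal_short_circuit : Prop := ∀ (giver_list : List String) (receiver_list : List String), Dom_short_circuit giver_list receiver_list → Spec_short_circuit giver_list receiver_list (short_circuit giver_list receiver_list)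

-- ===== LEMMAS AND PROOFS =====

-- B's normalised key for one zip pair
def pvKeyB (p : String × String) : String × String := (min p.1 p.2, max p.1 p.2)

-- sorted([a, b]) is [min a b, max a b]
theorem pv_sorted_pair (a b : String) :
    PySem.List.sorted [a, b] (fun x => x) false = [min a b, max a b] := by
  apply PySem.List.sorted_id_eq_of_perm_of_pairwise
  · rcases le_total a b with h | h
    · rw [min_eq_left h, max_eq_right h]
    · rw [min_eq_right h, max_eq_left h]
      exact List.Perm.swap a b []
  · refine List.Pairwise.cons (fun y hy => ?_) (List.pairwise_singleton _ _)
    rw [List.mem_singleton] at hy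
    subst hy
    exact min_le_max

-- A's loop computes "flag or: the pair list has a duplicate"
theorem pv_loopA_eq (pairs : List (List String)) (flag : Bool) :
    short_circuit_loopA pairs flag = (flag || decide (¬ pairs.Nodup)) := by
  induction pairs using List.reverseRecOn generalizing flag with
  | nil => simp [short_circuit_loopA]
  | append_singleton xs x ih =>
    rw [short_circuit_loopA]
    simp only [List.concat_ne_nil, List.getLast_concat, List.dropLast_concat,
      ne_eq, not_false_iff, dif_pos]
    rw [ih]
    by_cases hx : x ∈ xs <;> by_cases hn : xs.Nodup <;>
      simp [hx, hn, List.nodup_append]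

-- B's loop returns true iff some key repeats or is already in `seen`
theorem pv_loopB_eq (ks : List (String × String)) (seen : PySem.Set (String × String)) :
    short_circuit_loopB ks seen
      = decide (¬ (ks.map pvKeyB).Nodup ∨ ∃ k ∈ ks.map pvKeyB, k ∈ seen) := by
  induction ks generalizing seen with
  | nil => simp [short_circuit_loopB]
  | cons p rest ih =>
    obtain ⟨g, r⟩ := p
    rw [short_circuit_loopB, List.map_cons]
    have hK : pvKeyB (g, r) = (min g r, max g r) := rfl
    by_cases hmem : (min g r, max g r) ∈ seen
    · rw [if_pos hmem]
      exact (decide_eq_true (Or.inr ⟨pvKeyB (g, r), List.mem_cons_self, hK ▸ hmem⟩)).symm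
    · rw [if_neg hmem, ih, decide_eq_decide, hK]
      constructor
      · rintro (hnd | ⟨k, hk, hks⟩)
        · exact Or.inl (fun h => hnd h.of_cons)
        · rcases (PySem.Set.mem_add _ _ _).mp hks with hks | rfl
          · exact Or.inr ⟨k, List.mem_cons_of_mem _ hk, hks⟩
          · exact Or.inl (fun h => (List.nodup_cons.mp h).1 hk)
      · rintro (hnd | ⟨k, hk, hks⟩)
        · by_cases hKt : (min g r, max g r) ∈ rest.map pvKeyB
          · exact Or.inr ⟨_, hKt, (PySem.Set.mem_add _ _ _).mpr (Or.inr rfl)⟩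
          · exact Or.inl (fun h => hnd (List.nodup_cons.mpr ⟨hKt, h⟩))
        · rcases List.mem_cons.mp hk with rfl | hk'
          · exact absurd hks hmem
          · exact Or.inr ⟨k, hk', (PySem.Set.mem_add _ _ _).mpr (Or.inl hks)⟩

-- the embedding of B's pair key into A's sorted 2-element list is injective
theorem pv_nodup_emb (l : List (String × String)) :
    (l.map (fun p => [p.1, p.2])).Nodup ↔ l.Nodup := by
  apply List.nodup_map_iff
  intro a b h
  simpa [Prod.ext_iff] using h

-- ===== VERDICT (by name: the statement is the Claim_ definition above) =====
theorem short_circuit_spec : Claim_equal_short_circuit := by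
  intro giver_list receiver_list _
  unfold Spec_short_circuit short_circuit short_circuit_alt
  rw [pv_loopA_eq, pv_loopB_eq]
  have hmap : (giver_list.zip receiver_list).map
      (fun pair => PySem.List.sorted [pair.1, pair.2] (fun x => x) false)
      = ((giver_list.zip receiver_list).map pvKeyB).map (fun p => [p.1, p.2]) := by
    rw [List.map_map]
    exact List.map_congr_left (fun p _ => by simp [pv_sorted_pair, pvKeyB, Function.comp])
  rw [hmap, Bool.false_or, decide_eq_decide, pv_nodup_emb]
  simp [PySem.Set.empty]
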